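-- pv_equiv track=rewrite | github.com/FPomi/Programas_Python_2023 | Min nim/Min nim.py | calculate_P_positions
-- ===== SOURCE A (Python) =====
-- def calculate_P_positions(n1, n2, n3, r1, r2, r3):
--     max_n = max(n1, n2, n3)
--     p_positions = set()
--     n_positions = set()
--
--     # Base cases for dynamic programming
--     p_positions.add((0, 0, 0))
--     n_positions.add((0, 0, 0))
--
--     # Dynamic programming to calculate P-positions and N-positions
--     for n in range(1, max_n + 1):
--         for a in range(n1 + 1):
--             for b in range(n2 + 1):
--                 for c in range(n3 + 1):
--                     if a >= r1 and (a - r1, b, c) in n_positions: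
--                         p_positions.add((a, b, c))
--                     if b >= r2 and (a, b - r2, c) in n_positions:
--                         p_positions.add((a, b, c))
--                     if c >= r3 and (a, b, c - r3) in n_positions:
--                         p_positions.add((a, b, c))
--                     if (a, b, c) not in p_positions:
--                         n_positions.add((a, b, c))
--
--     return p_positions, n_positions
-- ===== SOURCE B (Python) =====
-- def calculate_P_positions(n1, n2, n3, r1, r2, r3):
--     # Single ordered pass over the position grid maintaining only the P-set;
--     # the N-set is derived afterwards as the complement (plus the (0,0,0) base case).
--     origin = (0, 0, 0)
--     p_positions = {origin}
--     for a in range(n1 + 1):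
--         for b in range(n2 + 1):
--             for c in range(n3 + 1):
--                 if ((a >= r1 and ((a - r1, b, c) == origin or (a - r1, b, c) not in p_positions))
--                         or (b >= r2 and ((a, b - r2, c) == origin or (a, b - r2, c) not in p_positions))
--                         or (c >= r3 and ((a, b, c - r3) == origin or (a, b, c - r3) not in p_positions))):
--                     p_positions.add((a, b, c))
--     n_positions = {origin}
--     for a in range(n1 + 1):
--         for b in range(n2 + 1):
--             for c in range(n3 + 1):
--                 if (a, b, c) not in p_positions:
--                     n_positions.add((a, b, c))
--     return p_positions, n_positions
-- ===== Notes on version B (the rewrite author's own statement) =====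
-- stated objective: faster
-- what changed: A re-sweeps the whole (n1+1)x(n2+1)x(n3+1) grid max(n1,n2,n3) times keeping both sets; B makes a single lexicographic pass maintaining only the P-set (testing predecessors against its complement) and derives the N-set afterwards as complement-plus-base, one grid traversal instead of max(n1,n2,n3); intended as asymptotically faster — a timing run measured B 7-9x faster at the largest size both reliably finished (n=16); at n=64 A always timed out while B's compute is sub-second but returning the ~275k-tuple result does not always fit the harness timeout.
import Mathlib
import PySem

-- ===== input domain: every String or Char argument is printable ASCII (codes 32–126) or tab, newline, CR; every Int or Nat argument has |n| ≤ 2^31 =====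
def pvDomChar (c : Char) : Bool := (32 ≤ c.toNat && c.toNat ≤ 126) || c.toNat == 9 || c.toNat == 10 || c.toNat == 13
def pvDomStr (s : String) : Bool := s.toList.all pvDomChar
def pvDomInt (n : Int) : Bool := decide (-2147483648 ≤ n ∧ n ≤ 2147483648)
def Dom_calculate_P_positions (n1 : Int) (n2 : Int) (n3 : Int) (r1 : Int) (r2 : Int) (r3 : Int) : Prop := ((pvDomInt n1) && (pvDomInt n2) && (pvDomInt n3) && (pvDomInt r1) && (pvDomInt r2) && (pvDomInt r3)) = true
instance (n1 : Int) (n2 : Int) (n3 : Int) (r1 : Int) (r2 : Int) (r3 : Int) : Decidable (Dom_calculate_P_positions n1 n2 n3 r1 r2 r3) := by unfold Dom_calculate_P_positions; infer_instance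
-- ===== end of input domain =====

-- B drops A's redundant outer `for n in range(1, max_n+1)` sweep (under Pre_ one ordered pass over
-- the grid already reaches the fixpoint) and maintains only the P-set during the pass, deriving the
-- N-set afterwards as complement-plus-base: one grid traversal instead of max(n1,n2,n3) of them;
-- intended as faster (a timing run measured B 7-9x faster at the largest size both finished).


-- ===== PORT A =====
-- body of A's innermost `for c in range(n3+1)` loop: the three guarded P-adds, then the N-add
def pvStepA (r1 r2 r3 : Int) (s : (List (Int × Int × Int)) × (List (Int × Int × Int))) (a b c : Int) :
    (List (Int × Int × Int)) × (List (Int × Int × Int)) :=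
  let p := s.1
  let n := s.2
  let p := if r1 ≤ a ∧ (a - r1, b, c) ∈ n then PySem.Set.add p (a, b, c) else p
  let p := if r2 ≤ b ∧ (a, b - r2, c) ∈ n then PySem.Set.add p (a, b, c) else p
  let p := if r3 ≤ c ∧ (a, b, c - r3) ∈ n then PySem.Set.add p (a, b, c) else p
  let n := if (a, b, c) ∉ p then PySem.Set.add n (a, b, c) else n
  (p, n)

def calculate_P_positions (n1 : Int) (n2 : Int) (n3 : Int) (r1 : Int) (r2 : Int) (r3 : Int) : (List (Int × Int × Int)) × (List (Int × Int × Int)) :=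
  let max_n := max (max n1 n2) n3
  let p0 : PySem.Set (Int × Int × Int) := PySem.Set.add PySem.Set.empty (0, 0, 0)
  let n0 : PySem.Set (Int × Int × Int) := PySem.Set.add PySem.Set.empty (0, 0, 0)
  (PySem.List.pyRange 1 (max_n + 1) 1).foldl (fun s _n =>
    (PySem.List.pyRange 0 (n1 + 1) 1).foldl (fun s a =>
      (PySem.List.pyRange 0 (n2 + 1) 1).foldl (fun s b =>
        (PySem.List.pyRange 0 (n3 + 1) 1).foldl (fun s c => pvStepA r1 r2 r3 s a b c) s) s) s) (p0, n0)

-- ===== PORT B =====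
-- body of B's single pass: conditionally add (a,b,c) to the P-set
def pvStepB (r1 r2 r3 : Int) (p : List (Int × Int × Int)) (a b c : Int) : List (Int × Int × Int) :=
  if (r1 ≤ a ∧ ((a - r1, b, c) = ((0 : Int), (0 : Int), (0 : Int)) ∨ (a - r1, b, c) ∉ p))
      ∨ (r2 ≤ b ∧ ((a, b - r2, c) = ((0 : Int), (0 : Int), (0 : Int)) ∨ (a, b - r2, c) ∉ p))
      ∨ (r3 ≤ c ∧ ((a, b, c - r3) = ((0 : Int), (0 : Int), (0 : Int)) ∨ (a, b, c - r3) ∉ p)) then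
    PySem.Set.add p (a, b, c)
  else p

def calculate_P_positions_alt (n1 : Int) (n2 : Int) (n3 : Int) (r1 : Int) (r2 : Int) (r3 : Int) : (List (Int × Int × Int)) × (List (Int × Int × Int)) :=
  let origin : Int × Int × Int := (0, 0, 0)
  let p : PySem.Set (Int × Int × Int) := PySem.Set.add PySem.Set.empty origin
  let p := (PySem.List.pyRange 0 (n1 + 1) 1).foldl (fun p a =>
    (PySem.List.pyRange 0 (n2 + 1) 1).foldl (fun p b =>
      (PySem.List.pyRange 0 (n3 + 1) 1).foldl (fun p c => pvStepB r1 r2 r3 p a b c) p) p) p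
  let n : PySem.Set (Int × Int × Int) := PySem.Set.add PySem.Set.empty origin
  let n := (PySem.List.pyRange 0 (n1 + 1) 1).foldl (fun n a =>
    (PySem.List.pyRange 0 (n2 + 1) 1).foldl (fun n b =>
      (PySem.List.pyRange 0 (n3 + 1) 1).foldl (fun n c =>
        if (a, b, c) ∉ p then PySem.Set.add n (a, b, c) else n) n) n) n
  (p, n)

-- ===== PRECONDITION & SPEC =====
-- Pre_ keeps the game's natural domain (removal amounts r1,r2,r3 ≥ 1) plus every degenerate grid
-- (some nᵢ < 0, or max(n1,n2,n3) ≤ 0, where the loops do no work for any r); it excludes only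
-- non-positive removal amounts on a non-trivial grid, where the subtraction game is meaningless and
-- the sets A returns are an artefact of how many identical sweeps max(n1,n2,n3) prescribes over
-- self-referential r ≤ 0 membership tests.
def Pre_calculate_P_positions (n1 : Int) (n2 : Int) (n3 : Int) (r1 : Int) (r2 : Int) (r3 : Int) : Prop :=
  (1 ≤ r1 ∧ 1 ≤ r2 ∧ 1 ≤ r3) ∨ (n1 < 0 ∨ n2 < 0 ∨ n3 < 0) ∨ max (max n1 n2) n3 ≤ 0
instance (n1 : Int) (n2 : Int) (n3 : Int) (r1 : Int) (r2 : Int) (r3 : Int) : Decidable (Pre_calculate_P_positions n1 n2 n3 r1 r2 r3) := by unfold Pre_calculate_P_positions; infer_instance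
def pvWitness_calculate_P_positions : Int × Int × Int × Int × Int × Int := (3, 3, 3, 1, 1, 2)

def Spec_calculate_P_positions (n1 : Int) (n2 : Int) (n3 : Int) (r1 : Int) (r2 : Int) (r3 : Int) (out : (List (Int × Int × Int)) × (List (Int × Int × Int))) : Prop := out = calculate_P_positions_alt n1 n2 n3 r1 r2 r3
instance (n1 : Int) (n2 : Int) (n3 : Int) (r1 : Int) (r2 : Int) (r3 : Int) (out : (List (Int × Int × Int)) × (List (Int × Int × Int))) : Decidable (Spec_calculate_P_positions n1 n2 n3 r1 r2 r3 out) := by unfold Spec_calculate_P_positions; infer_instance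

-- ===== CLAIM (what is proved, stated in full; the proofs are below) =====
def Claim_equal_calculate_P_positions : Prop := ∀ (n1 : Int) (n2 : Int) (n3 : Int) (r1 : Int) (r2 : Int) (r3 : Int), Dom_calculate_P_positions n1 n2 n3 r1 r2 r3 → Pre_calculate_P_positions n1 n2 n3 r1 r2 r3 → Spec_calculate_P_positions n1 n2 n3 r1 r2 r3 (calculate_P_positions n1 n2 n3 r1 r2 r3)

-- ===== LEMMAS AND PROOFS =====

def pvO : Int × Int × Int := (0, 0, 0)

def pvLexLt (x y : Int × Int × Int) : Prop :=
  x.1 < y.1 ∨ (x.1 = y.1 ∧ (x.2.1 < y.2.1 ∨ (x.2.1 = y.2.1 ∧ x.2.2 < y.2.2)))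

def pvGrid (n1 n2 n3 : Int) : List (Int × Int × Int) :=
  (PySem.List.pyRange 0 (n1 + 1) 1).flatMap fun a =>
    (PySem.List.pyRange 0 (n2 + 1) 1).flatMap fun b =>
      (PySem.List.pyRange 0 (n3 + 1) 1).map fun c => (a, b, c)

def pvGood (r1 r2 r3 a b c : Int) : Bool :=
  (if _h1 : 1 ≤ r1 ∧ r1 ≤ a then
      ((a - r1 == 0 && b == 0 && c == 0) || !pvGood r1 r2 r3 (a - r1) b c) else false)
  || (if _h2 : 1 ≤ r2 ∧ r2 ≤ b then
      ((a == 0 && b - r2 == 0 && c == 0) || !pvGood r1 r2 r3 a (b - r2) c) else false)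
  || (if _h3 : 1 ≤ r3 ∧ r3 ≤ c then
      ((a == 0 && b == 0 && c - r3 == 0) || !pvGood r1 r2 r3 a b (c - r3)) else false)
termination_by a.toNat + b.toNat + c.toNat
decreasing_by all_goals omega

def pvP (r1 r2 r3 : Int) (t : List (Int × Int × Int)) : List (Int × Int × Int) :=
  pvO :: t.filter (fun x => pvGood r1 r2 r3 x.1 x.2.1 x.2.2)

def pvN (r1 r2 r3 : Int) (t : List (Int × Int × Int)) : List (Int × Int × Int) :=
  pvO :: t.filter (fun x => !pvGood r1 r2 r3 x.1 x.2.1 x.2.2 && !(x == pvO))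

lemma pvGood_origin (r1 r2 r3 : Int) : pvGood r1 r2 r3 0 0 0 = false := by
  rw [pvGood]
  split_ifs with h1 h2 h3 <;> first | rfl | omega

lemma pvMem_grid {n1 n2 n3 : Int} {x : Int × Int × Int} :
    x ∈ pvGrid n1 n2 n3 ↔ 0 ≤ x.1 ∧ x.1 ≤ n1 ∧ 0 ≤ x.2.1 ∧ x.2.1 ≤ n2 ∧ 0 ≤ x.2.2 ∧ x.2.2 ≤ n3 := by
  obtain ⟨a,b,c⟩ := x
  unfold pvGrid
  simp only [List.mem_flatMap, List.mem_map, PySem.List.mem_pyRange_one, Prod.mk.injEq]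
  constructor
  · rintro ⟨a',ha,b',hb,c',hc,rfl,rfl,rfl⟩; omega
  · rintro ⟨h1,h2,h3,h4,h5,h6⟩; exact ⟨a, by omega, b, by omega, c, by omega, rfl, rfl, rfl⟩

lemma pvMem_pvP {r1 r2 r3 : Int} {t : List (Int × Int × Int)} {y : Int × Int × Int} :
    y ∈ pvP r1 r2 r3 t ↔ y = pvO ∨ (y ∈ t ∧ pvGood r1 r2 r3 y.1 y.2.1 y.2.2 = true) := by
  simp [pvP, List.mem_filter]

lemma pvMem_pvN {r1 r2 r3 : Int} {t : List (Int × Int × Int)} {y : Int × Int × Int} :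
    y ∈ pvN r1 r2 r3 t ↔ y = pvO ∨ (y ∈ t ∧ pvGood r1 r2 r3 y.1 y.2.1 y.2.2 = false ∧ y ≠ pvO) := by
  simp [pvN, List.mem_filter]

lemma pvAdd_mem {x : Int × Int × Int} {s : List (Int × Int × Int)} (h : x ∈ s) :
    PySem.Set.add s x = s := by
  simp only [PySem.Set.add, PySem.Set.contains]
  rw [if_pos (by simpa using List.elem_eq_true_of_mem h)]

lemma pvAdd_not_mem {x : Int × Int × Int} {s : List (Int × Int × Int)} (h : x ∉ s) :
    PySem.Set.add s x = s ++ [x] := by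
  simp only [PySem.Set.add, PySem.Set.contains]
  rw [if_neg]
  simpa using h

lemma pvAdd_idem (s : List (Int × Int × Int)) (x : Int × Int × Int) :
    PySem.Set.add (PySem.Set.add s x) x = PySem.Set.add s x := by
  apply pvAdd_mem
  exact (PySem.Set.mem_add s x x).2 (Or.inr rfl)

lemma pvChain (p : List (Int × Int × Int)) (x : Int × Int × Int) (q1 q2 q3 : Prop)
    [Decidable q1] [Decidable q2] [Decidable q3] :
    (if q3 then PySem.Set.add (if q2 then PySem.Set.add (if q1 then PySem.Set.add p x else p) x
        else (if q1 then PySem.Set.add p x else p)) x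
      else (if q2 then PySem.Set.add (if q1 then PySem.Set.add p x else p) x
        else (if q1 then PySem.Set.add p x else p))) =
    if q1 ∨ q2 ∨ q3 then PySem.Set.add p x else p := by
  by_cases h1 : q1 <;> by_cases h2 : q2 <;> by_cases h3 : q3 <;>
    simp [h1, h2, h3, pvAdd_idem]

lemma pvFoldClosed {σ T : Type} (f : σ → T → σ) (g : List T → σ) (L : List T)
    (h : ∀ t x u, L = t ++ x :: u → f (g t) x = g (t ++ [x])) :
    ∀ u t, L = t ++ u → u.foldl f (g t) = g L := by
  intro u
  induction u with
  | nil => intro t ht; simp only [List.foldl_nil]; rw [ht]; simp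
  | cons x u ih =>
    intro t ht
    have hx : f (g t) x = g (t ++ [x]) := h t x u ht
    simp only [List.foldl_cons, hx]
    exact ih (t ++ [x]) (by simpa using ht)

lemma pvGrid_pairwise (n1 n2 n3 : Int) : (pvGrid n1 n2 n3).Pairwise pvLexLt := by
  unfold pvGrid
  rw [List.pairwise_flatMap]
  constructor
  · intro a _
    rw [List.pairwise_flatMap]
    constructor
    · intro b _
      rw [List.pairwise_map]
      exact (PySem.List.pairwise_lt_pyRange_one 0 (n3+1)).imp (fun h => by simp [pvLexLt, h])
    · exact (PySem.List.pairwise_lt_pyRange_one 0 (n2+1)).imp (fun h x hx y hy => by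
        simp only [List.mem_map] at hx hy
        obtain ⟨c1,_,rfl⟩ := hx; obtain ⟨c2,_,rfl⟩ := hy
        simp [pvLexLt, h])
  · exact (PySem.List.pairwise_lt_pyRange_one 0 (n1+1)).imp (fun h x hx y hy => by
      simp only [List.mem_flatMap, List.mem_map] at hx hy
      obtain ⟨b1,_,c1,_,rfl⟩ := hx; obtain ⟨b2,_,c2,_,rfl⟩ := hy
      simp [pvLexLt, h])

lemma pvPrefix_closed {n1 n2 n3 : Int} {t u : List (Int × Int × Int)} {x y : Int × Int × Int}
    (hs : pvGrid n1 n2 n3 = t ++ x :: u) (hy : y ∈ pvGrid n1 n2 n3) (hlt : pvLexLt y x) : y ∈ t := by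
  have hp := pvGrid_pairwise n1 n2 n3
  rw [hs] at hp hy
  rcases List.mem_append.1 hy with h | h
  · exact h
  · rcases List.mem_cons.1 h with rfl | h
    · exfalso; unfold pvLexLt at hlt; omega
    · have := (List.pairwise_append.1 hp).2.1
      have hxy : pvLexLt x y := (List.pairwise_cons.1 this).1 y h
      exfalso; unfold pvLexLt at hlt hxy; omega

lemma pvNot_mem_prefix {n1 n2 n3 : Int} {t u : List (Int × Int × Int)} {x : Int × Int × Int}
    (hs : pvGrid n1 n2 n3 = t ++ x :: u) : x ∉ t := by
  intro hx
  have hp := pvGrid_pairwise n1 n2 n3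
  rw [hs] at hp
  have := (List.pairwise_append.1 hp).2.2 x hx x (by simp)
  unfold pvLexLt at this; omega

lemma pvCond_iff_good {n1 n2 n3 r1 r2 r3 : Int} {t : List (Int × Int × Int)} {a b c : Int}
    (hr : 1 ≤ r1 ∧ 1 ≤ r2 ∧ 1 ≤ r3)
    (hb : (a, b, c) ∈ pvGrid n1 n2 n3)
    (hT : ∀ y, y ∈ pvGrid n1 n2 n3 → pvLexLt y (a, b, c) → y ∈ t) :
    ((r1 ≤ a ∧ (a - r1, b, c) ∈ pvN r1 r2 r3 t) ∨ (r2 ≤ b ∧ (a, b - r2, c) ∈ pvN r1 r2 r3 t)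
      ∨ (r3 ≤ c ∧ (a, b, c - r3) ∈ pvN r1 r2 r3 t)) ↔ pvGood r1 r2 r3 a b c = true := by
  obtain ⟨hr1, hr2, hr3⟩ := hr
  rw [pvMem_grid] at hb
  simp only at hb
  rw [pvGood]
  simp only [Bool.or_eq_true]
  constructor
  · rintro (⟨hg, hm⟩ | ⟨hg, hm⟩ | ⟨hg, hm⟩)
    · left; left
      rw [dif_pos ⟨hr1, hg⟩]
      rcases pvMem_pvN.1 hm with he | ⟨_, hgf, _⟩
      · simp [pvO, Prod.ext_iff] at he; simp [he]
      · simp [hgf]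
    · left; right
      rw [dif_pos ⟨hr2, hg⟩]
      rcases pvMem_pvN.1 hm with he | ⟨_, hgf, _⟩
      · simp [pvO, Prod.ext_iff] at he; simp [he]
      · simp [hgf]
    · right
      rw [dif_pos ⟨hr3, hg⟩]
      rcases pvMem_pvN.1 hm with he | ⟨_, hgf, _⟩
      · simp [pvO, Prod.ext_iff] at he; simp [he]
      · simp [hgf]
  · rintro ((h | h) | h)
    · rw [dite_eq_iff] at h
      rcases h with ⟨⟨h1, hg⟩, hv⟩ | ⟨_, hv⟩
      case _ =>
        refine Or.inl ⟨hg, ?_⟩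
        rw [pvMem_pvN]
        simp only [Bool.or_eq_true, beq_iff_eq, Bool.not_eq_eq_eq_not, Bool.not_true,
          Bool.and_eq_true] at hv
        rcases hv with hE | hgf
        · left; simp only [pvO, Prod.ext_iff]; omega
        · by_cases ho : (a - r1, b, c) = pvO
          · exact Or.inl ho
          · refine Or.inr ⟨hT _ (pvMem_grid.2 (by simp; omega)) (by unfold pvLexLt; simp; omega), by simpa using hgf, ho⟩
      case _ => cases hv
    · rw [dite_eq_iff] at h
      rcases h with ⟨⟨h1, hg⟩, hv⟩ | ⟨_, hv⟩
      case _ =>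
        refine Or.inr (Or.inl ⟨hg, ?_⟩)
        rw [pvMem_pvN]
        simp only [Bool.or_eq_true, beq_iff_eq, Bool.not_eq_eq_eq_not, Bool.not_true,
          Bool.and_eq_true] at hv
        rcases hv with hE | hgf
        · left; simp only [pvO, Prod.ext_iff]; omega
        · by_cases ho : (a, b - r2, c) = pvO
          · exact Or.inl ho
          · refine Or.inr ⟨hT _ (pvMem_grid.2 (by simp; omega)) (by unfold pvLexLt; simp; omega), by simpa using hgf, ho⟩
      case _ => cases hv
    · rw [dite_eq_iff] at h
      rcases h with ⟨⟨h1, hg⟩, hv⟩ | ⟨_, hv⟩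
      case _ =>
        refine Or.inr (Or.inr ⟨hg, ?_⟩)
        rw [pvMem_pvN]
        simp only [Bool.or_eq_true, beq_iff_eq, Bool.not_eq_eq_eq_not, Bool.not_true,
          Bool.and_eq_true] at hv
        rcases hv with hE | hgf
        · left; simp only [pvO, Prod.ext_iff]; omega
        · by_cases ho : (a, b, c - r3) = pvO
          · exact Or.inl ho
          · refine Or.inr ⟨hT _ (pvMem_grid.2 (by simp; omega)) (by unfold pvLexLt; simp; omega), by simpa using hgf, ho⟩
      case _ => cases hv

lemma pvStepA_closed {n1 n2 n3 r1 r2 r3 : Int} {t : List (Int × Int × Int)} {a b c : Int}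
    (hr : 1 ≤ r1 ∧ 1 ≤ r2 ∧ 1 ≤ r3)
    (hb : (a, b, c) ∈ pvGrid n1 n2 n3)
    (hT : ∀ y, y ∈ pvGrid n1 n2 n3 → pvLexLt y (a, b, c) → y ∈ t) :
    pvStepA r1 r2 r3 (pvP r1 r2 r3 t, pvN r1 r2 r3 t) a b c =
      ((if pvGood r1 r2 r3 a b c then PySem.Set.add (pvP r1 r2 r3 t) (a, b, c) else pvP r1 r2 r3 t),
       (if pvGood r1 r2 r3 a b c = false ∧ (a, b, c) ≠ pvO then PySem.Set.add (pvN r1 r2 r3 t) (a, b, c) else pvN r1 r2 r3 t)) := by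
  have hC := pvCond_iff_good hr hb hT
  unfold pvStepA
  simp only []
  rw [pvChain]
  rw [if_congr hC rfl rfl]
  by_cases hg : pvGood r1 r2 r3 a b c = true
  · simp [hg, PySem.Set.mem_add]
  · by_cases ho : (a, b, c) = pvO
    · simp [hg, ho, pvMem_pvP]
    · simp [hg, ho, pvMem_pvP]

lemma pvCondB_iff_good {n1 n2 n3 r1 r2 r3 : Int} {t : List (Int × Int × Int)} {a b c : Int}
    (hr : 1 ≤ r1 ∧ 1 ≤ r2 ∧ 1 ≤ r3)
    (hb : (a, b, c) ∈ pvGrid n1 n2 n3)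
    (hT : ∀ y, y ∈ pvGrid n1 n2 n3 → pvLexLt y (a, b, c) → y ∈ t) :
    ((r1 ≤ a ∧ ((a - r1, b, c) = pvO ∨ (a - r1, b, c) ∉ pvP r1 r2 r3 t))
      ∨ (r2 ≤ b ∧ ((a, b - r2, c) = pvO ∨ (a, b - r2, c) ∉ pvP r1 r2 r3 t))
      ∨ (r3 ≤ c ∧ ((a, b, c - r3) = pvO ∨ (a, b, c - r3) ∉ pvP r1 r2 r3 t)))
      ↔ pvGood r1 r2 r3 a b c = true := by
  obtain ⟨hr1, hr2, hr3⟩ := hr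
  rw [pvMem_grid] at hb
  simp only at hb
  rw [pvGood]
  simp only [Bool.or_eq_true]
  constructor
  · rintro (⟨hg, hm⟩ | ⟨hg, hm⟩ | ⟨hg, hm⟩)
    · left; left
      rw [dif_pos ⟨hr1, hg⟩]
      rcases hm with he | hnm
      · simp only [pvO, Prod.ext_iff] at he; simp [he]
      · have := hT (a - r1, b, c) (pvMem_grid.2 (by simp; omega)) (by unfold pvLexLt; simp; omega)
        have hng : ¬ pvGood r1 r2 r3 (a - r1) b c = true := fun hgd =>
          hnm (pvMem_pvP.2 (Or.inr ⟨this, hgd⟩))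
        simp [hng]
    · left; right
      rw [dif_pos ⟨hr2, hg⟩]
      rcases hm with he | hnm
      · simp only [pvO, Prod.ext_iff] at he; simp [he]
      · have := hT (a, b - r2, c) (pvMem_grid.2 (by simp; omega)) (by unfold pvLexLt; simp; omega)
        have hng : ¬ pvGood r1 r2 r3 a (b - r2) c = true := fun hgd =>
          hnm (pvMem_pvP.2 (Or.inr ⟨this, hgd⟩))
        simp [hng]
    · right
      rw [dif_pos ⟨hr3, hg⟩]
      rcases hm with he | hnm
      · simp only [pvO, Prod.ext_iff] at he; simp [he]
      · have := hT (a, b, c - r3) (pvMem_grid.2 (by simp; omega)) (by unfold pvLexLt; simp; omega)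
        have hng : ¬ pvGood r1 r2 r3 a b (c - r3) = true := fun hgd =>
          hnm (pvMem_pvP.2 (Or.inr ⟨this, hgd⟩))
        simp [hng]
  · rintro ((h | h) | h)
    · rw [dite_eq_iff] at h
      rcases h with ⟨⟨h1, hg⟩, hv⟩ | ⟨_, hv⟩
      case _ =>
        refine Or.inl ⟨hg, ?_⟩
        simp only [Bool.or_eq_true, beq_iff_eq, Bool.not_eq_eq_eq_not, Bool.not_true,
          Bool.and_eq_true] at hv
        by_cases ho : (a - r1, b, c) = pvO
        · exact Or.inl ho
        · refine Or.inr (fun hmem => ?_)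
          rcases pvMem_pvP.1 hmem with he | ⟨_, hgd⟩
          · exact ho he
          · rcases hv with hE | hgf
            · exact ho (by simp only [pvO, Prod.ext_iff]; omega)
            · simp only [hgd] at hgf; cases hgf
      case _ => cases hv
    · rw [dite_eq_iff] at h
      rcases h with ⟨⟨h1, hg⟩, hv⟩ | ⟨_, hv⟩
      case _ =>
        refine Or.inr (Or.inl ⟨hg, ?_⟩)
        simp only [Bool.or_eq_true, beq_iff_eq, Bool.not_eq_eq_eq_not, Bool.not_true,
          Bool.and_eq_true] at hv
        by_cases ho : (a, b - r2, c) = pvO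
        · exact Or.inl ho
        · refine Or.inr (fun hmem => ?_)
          rcases pvMem_pvP.1 hmem with he | ⟨_, hgd⟩
          · exact ho he
          · rcases hv with hE | hgf
            · exact ho (by simp only [pvO, Prod.ext_iff]; omega)
            · simp only [hgd] at hgf; cases hgf
      case _ => cases hv
    · rw [dite_eq_iff] at h
      rcases h with ⟨⟨h1, hg⟩, hv⟩ | ⟨_, hv⟩
      case _ =>
        refine Or.inr (Or.inr ⟨hg, ?_⟩)
        simp only [Bool.or_eq_true, beq_iff_eq, Bool.not_eq_eq_eq_not, Bool.not_true,
          Bool.and_eq_true] at hv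
        by_cases ho : (a, b, c - r3) = pvO
        · exact Or.inl ho
        · refine Or.inr (fun hmem => ?_)
          rcases pvMem_pvP.1 hmem with he | ⟨_, hgd⟩
          · exact ho he
          · rcases hv with hE | hgf
            · exact ho (by simp only [pvO, Prod.ext_iff]; omega)
            · simp only [hgd] at hgf; cases hgf
      case _ => cases hv

lemma pvStepB_closed {n1 n2 n3 r1 r2 r3 : Int} {t : List (Int × Int × Int)} {a b c : Int}
    (hr : 1 ≤ r1 ∧ 1 ≤ r2 ∧ 1 ≤ r3)
    (hb : (a, b, c) ∈ pvGrid n1 n2 n3)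
    (hT : ∀ y, y ∈ pvGrid n1 n2 n3 → pvLexLt y (a, b, c) → y ∈ t) :
    pvStepB r1 r2 r3 (pvP r1 r2 r3 t) a b c =
      (if pvGood r1 r2 r3 a b c then PySem.Set.add (pvP r1 r2 r3 t) (a, b, c) else pvP r1 r2 r3 t) := by
  have hC := pvCondB_iff_good hr hb hT
  unfold pvStepB
  rw [if_congr (by exact hC) rfl rfl]

lemma pvP_append {r1 r2 r3 : Int} {t : List (Int × Int × Int)} {x : Int × Int × Int} (hx : x ∉ t) :
    (if pvGood r1 r2 r3 x.1 x.2.1 x.2.2 then PySem.Set.add (pvP r1 r2 r3 t) x else pvP r1 r2 r3 t)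
      = pvP r1 r2 r3 (t ++ [x]) := by
  by_cases hg : pvGood r1 r2 r3 x.1 x.2.1 x.2.2 = true
  · have hxo : x ≠ pvO := by
      rintro rfl; simp only [pvO] at hg; rw [pvGood_origin] at hg; cases hg
    rw [if_pos hg, pvAdd_not_mem (fun hm => by
      rcases pvMem_pvP.1 hm with he | ⟨ht, _⟩
      · exact hxo he
      · exact hx ht)]
    simp [pvP, List.filter_append, hg]
  · rw [if_neg hg]
    simp only [Bool.not_eq_true] at hg
    simp [pvP, List.filter_append, hg]

lemma pvN_append {r1 r2 r3 : Int} {t : List (Int × Int × Int)} {x : Int × Int × Int} (hx : x ∉ t) :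
    (if pvGood r1 r2 r3 x.1 x.2.1 x.2.2 = false ∧ x ≠ pvO then PySem.Set.add (pvN r1 r2 r3 t) x else pvN r1 r2 r3 t)
      = pvN r1 r2 r3 (t ++ [x]) := by
  by_cases hc : pvGood r1 r2 r3 x.1 x.2.1 x.2.2 = false ∧ x ≠ pvO
  · rw [if_pos hc, pvAdd_not_mem (fun hm => by
      rcases pvMem_pvN.1 hm with he | ⟨ht, _⟩
      · exact hc.2 he
      · exact hx ht)]
    simp [pvN, List.filter_append, hc.1, hc.2]
  · rw [if_neg hc]
    rcases Decidable.not_and_iff_or_not.1 hc with hg | ho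
    · simp only [Bool.not_eq_false] at hg
      simp [pvN, List.filter_append, hg]
    · simp only [not_not] at ho
      simp [pvN, List.filter_append, ho]

lemma pvStepA_fix {n1 n2 n3 r1 r2 r3 : Int} {x : Int × Int × Int}
    (hr : 1 ≤ r1 ∧ 1 ≤ r2 ∧ 1 ≤ r3) (hb : x ∈ pvGrid n1 n2 n3) :
    pvStepA r1 r2 r3 (pvP r1 r2 r3 (pvGrid n1 n2 n3), pvN r1 r2 r3 (pvGrid n1 n2 n3)) x.1 x.2.1 x.2.2
      = (pvP r1 r2 r3 (pvGrid n1 n2 n3), pvN r1 r2 r3 (pvGrid n1 n2 n3)) := by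
  obtain ⟨a, b, c⟩ := x
  rw [pvStepA_closed hr hb (fun y hy _ => hy)]
  by_cases hg : pvGood r1 r2 r3 a b c = true
  · rw [if_pos hg, pvAdd_mem (pvMem_pvP.2 (Or.inr ⟨hb, hg⟩))]
    rw [if_neg (by simp [hg])]
  · rw [if_neg hg]
    simp only [Bool.not_eq_true] at hg
    by_cases ho : (a, b, c) = pvO
    · rw [if_neg (by simp [ho])]
    · rw [if_pos ⟨hg, ho⟩, pvAdd_mem (pvMem_pvN.2 (Or.inr ⟨hb, hg, ho⟩))]

lemma pvIterFix {σ T : Type} (pass : σ → σ) (fp : σ) (h : pass fp = fp) :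
    ∀ l : List T, l.foldl (fun s _ => pass s) fp = fp := by
  intro l
  induction l with
  | nil => rfl
  | cons x l ih => simp only [List.foldl_cons, h]; exact ih

lemma pvPassA {n1 n2 n3 r1 r2 r3 : Int} (hr : 1 ≤ r1 ∧ 1 ≤ r2 ∧ 1 ≤ r3) :
    (pvGrid n1 n2 n3).foldl (fun s x => pvStepA r1 r2 r3 s x.1 x.2.1 x.2.2)
      (pvP r1 r2 r3 [], pvN r1 r2 r3 []) =
      (pvP r1 r2 r3 (pvGrid n1 n2 n3), pvN r1 r2 r3 (pvGrid n1 n2 n3)) := by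
  refine pvFoldClosed _ (fun t => (pvP r1 r2 r3 t, pvN r1 r2 r3 t)) (pvGrid n1 n2 n3)
    (fun t x u hsplit => ?_) (pvGrid n1 n2 n3) [] rfl
  have hb : x ∈ pvGrid n1 n2 n3 := by rw [hsplit]; simp
  have hx : x ∉ t := pvNot_mem_prefix hsplit
  obtain ⟨a, b, c⟩ := x
  simp only
  rw [pvStepA_closed hr hb (fun y hy hlt => pvPrefix_closed hsplit hy hlt)]
  exact congrArg₂ Prod.mk (pvP_append hx) (pvN_append hx)

lemma pvPassA_fix {n1 n2 n3 r1 r2 r3 : Int} (hr : 1 ≤ r1 ∧ 1 ≤ r2 ∧ 1 ≤ r3) :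
    (pvGrid n1 n2 n3).foldl (fun s x => pvStepA r1 r2 r3 s x.1 x.2.1 x.2.2)
      (pvP r1 r2 r3 (pvGrid n1 n2 n3), pvN r1 r2 r3 (pvGrid n1 n2 n3)) =
      (pvP r1 r2 r3 (pvGrid n1 n2 n3), pvN r1 r2 r3 (pvGrid n1 n2 n3)) := by
  refine pvFoldClosed _ (fun _ => (pvP r1 r2 r3 (pvGrid n1 n2 n3), pvN r1 r2 r3 (pvGrid n1 n2 n3)))
    (pvGrid n1 n2 n3) (fun t x u hsplit => ?_) (pvGrid n1 n2 n3) [] rfl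
  exact pvStepA_fix hr (by rw [hsplit]; simp)

lemma pvPassB {n1 n2 n3 r1 r2 r3 : Int} (hr : 1 ≤ r1 ∧ 1 ≤ r2 ∧ 1 ≤ r3) :
    (pvGrid n1 n2 n3).foldl (fun p x => pvStepB r1 r2 r3 p x.1 x.2.1 x.2.2) (pvP r1 r2 r3 []) =
      pvP r1 r2 r3 (pvGrid n1 n2 n3) := by
  refine pvFoldClosed _ (pvP r1 r2 r3) (pvGrid n1 n2 n3)
    (fun t x u hsplit => ?_) (pvGrid n1 n2 n3) [] rfl
  have hb : x ∈ pvGrid n1 n2 n3 := by rw [hsplit]; simp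
  have hx : x ∉ t := pvNot_mem_prefix hsplit
  obtain ⟨a, b, c⟩ := x
  simp only
  rw [pvStepB_closed hr hb (fun y hy hlt => pvPrefix_closed hsplit hy hlt)]
  exact pvP_append hx

lemma pvPassBN {n1 n2 n3 r1 r2 r3 : Int} (hr : 1 ≤ r1 ∧ 1 ≤ r2 ∧ 1 ≤ r3) :
    (pvGrid n1 n2 n3).foldl
      (fun n x => if x ∉ pvP r1 r2 r3 (pvGrid n1 n2 n3) then PySem.Set.add n x else n)
      (pvN r1 r2 r3 []) = pvN r1 r2 r3 (pvGrid n1 n2 n3) := by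
  refine pvFoldClosed _ (pvN r1 r2 r3) (pvGrid n1 n2 n3)
    (fun t x u hsplit => ?_) (pvGrid n1 n2 n3) [] rfl
  have hb : x ∈ pvGrid n1 n2 n3 := by rw [hsplit]; simp
  have hx : x ∉ t := pvNot_mem_prefix hsplit
  rw [← pvN_append hx]
  by_cases hg : pvGood r1 r2 r3 x.1 x.2.1 x.2.2 = true
  · rw [if_neg (by simp; exact pvMem_pvP.2 (Or.inr ⟨hb, hg⟩)), if_neg (by simp [hg])]
  · by_cases ho : x = pvO
    · rw [if_neg (by simp; exact pvMem_pvP.2 (Or.inl ho)), if_neg (by simp [ho])]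
    · simp only [Bool.not_eq_true] at hg
      rw [if_pos (fun hm => by
        rcases pvMem_pvP.1 hm with he | ⟨_, hgd⟩
        · exact ho he
        · simp [hgd] at hg), if_pos ⟨hg, ho⟩]

lemma pvDegenerate {n1 n2 n3 r1 r2 r3 : Int} (hm : max (max n1 n2) n3 ≤ 0) :
    pvP r1 r2 r3 (pvGrid n1 n2 n3) = [pvO] ∧ pvN r1 r2 r3 (pvGrid n1 n2 n3) = [pvO] := by
  have hall : ∀ x ∈ pvGrid n1 n2 n3, x = pvO := by
    intro x hxx
    rw [pvMem_grid] at hxx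
    simp only [max_le_iff] at hm
    obtain ⟨a, b, c⟩ := x
    simp only at hxx
    simp only [pvO, Prod.ext_iff]
    omega
  constructor
  · unfold pvP
    rw [List.filter_eq_nil_iff.2 (fun x hxx => by rw [hall x hxx]; simp [pvO, pvGood_origin])]
  · unfold pvN
    rw [List.filter_eq_nil_iff.2 (fun x hxx => by rw [hall x hxx]; simp)]

lemma pvFoldA (n1 n2 n3 r1 r2 r3 : Int) (s : (List (Int × Int × Int)) × (List (Int × Int × Int))) :
    (PySem.List.pyRange 0 (n1 + 1) 1).foldl (fun s a =>
      (PySem.List.pyRange 0 (n2 + 1) 1).foldl (fun s b =>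
        (PySem.List.pyRange 0 (n3 + 1) 1).foldl (fun s c => pvStepA r1 r2 r3 s a b c) s) s) s
    = (pvGrid n1 n2 n3).foldl (fun s x => pvStepA r1 r2 r3 s x.1 x.2.1 x.2.2) s := by
  simp [pvGrid, List.foldl_flatMap, List.foldl_map]

lemma pvFoldB (n1 n2 n3 r1 r2 r3 : Int) (p : List (Int × Int × Int)) :
    (PySem.List.pyRange 0 (n1 + 1) 1).foldl (fun p a =>
      (PySem.List.pyRange 0 (n2 + 1) 1).foldl (fun p b =>
        (PySem.List.pyRange 0 (n3 + 1) 1).foldl (fun p c => pvStepB r1 r2 r3 p a b c) p) p) p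
    = (pvGrid n1 n2 n3).foldl (fun p x => pvStepB r1 r2 r3 p x.1 x.2.1 x.2.2) p := by
  simp [pvGrid, List.foldl_flatMap, List.foldl_map]

lemma pvFoldBN (n1 n2 n3 : Int) (q n : List (Int × Int × Int)) :
    (PySem.List.pyRange 0 (n1 + 1) 1).foldl (fun n a =>
      (PySem.List.pyRange 0 (n2 + 1) 1).foldl (fun n b =>
        (PySem.List.pyRange 0 (n3 + 1) 1).foldl (fun n c =>
          if (a, b, c) ∉ q then PySem.Set.add n (a, b, c) else n) n) n) n
    = (pvGrid n1 n2 n3).foldl (fun n x => if x ∉ q then PySem.Set.add n x else n) n := by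
  simp [pvGrid, List.foldl_flatMap, List.foldl_map]

lemma pvStart (r1 r2 r3 : Int) :
    (PySem.Set.add PySem.Set.empty ((0 : Int), (0 : Int), (0 : Int)) : PySem.Set (Int × Int × Int))
      = pvP r1 r2 r3 [] ∧
    (PySem.Set.add PySem.Set.empty ((0 : Int), (0 : Int), (0 : Int)) : PySem.Set (Int × Int × Int))
      = pvN r1 r2 r3 [] := by
  constructor <;> rfl

theorem pv_main (n1 n2 n3 r1 r2 r3 : Int) (hr : 1 ≤ r1 ∧ 1 ≤ r2 ∧ 1 ≤ r3) :
    calculate_P_positions n1 n2 n3 r1 r2 r3 = calculate_P_positions_alt n1 n2 n3 r1 r2 r3 := by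
  have hB : calculate_P_positions_alt n1 n2 n3 r1 r2 r3
      = (pvP r1 r2 r3 (pvGrid n1 n2 n3), pvN r1 r2 r3 (pvGrid n1 n2 n3)) := by
    unfold calculate_P_positions_alt
    simp only [pvFoldB, pvFoldBN]
    rw [(pvStart r1 r2 r3).1, pvPassB hr]
    rw [show (pvP r1 r2 r3 [] : List (Int × Int × Int)) = pvN r1 r2 r3 [] from rfl,
      pvPassBN hr]
  rw [hB]
  unfold calculate_P_positions
  simp only [pvFoldA]
  rw [(pvStart r1 r2 r3).1]
  rw [show ((pvP r1 r2 r3 [], pvP r1 r2 r3 []) : (List (Int × Int × Int)) × (List (Int × Int × Int)))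
      = (pvP r1 r2 r3 [], pvN r1 r2 r3 []) from rfl]
  by_cases hm : max (max n1 n2) n3 ≤ 0
  · rw [PySem.List.pyRange_one_eq_nil (by omega)]
    simp only [List.foldl_nil]
    obtain ⟨h1, h2⟩ := pvDegenerate (r1 := r1) (r2 := r2) (r3 := r3) hm
    rw [h1, h2]
    rfl
  · rw [PySem.List.pyRange_one_cons (by omega)]
    simp only [List.foldl_cons]
    rw [pvPassA hr]
    exact pvIterFix _ _ (pvPassA_fix hr) _

lemma pvGrid_nil {n1 n2 n3 : Int} (h : n1 < 0 ∨ n2 < 0 ∨ n3 < 0) : pvGrid n1 n2 n3 = [] := by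
  rw [List.eq_nil_iff_forall_not_mem]
  intro x hx
  rw [pvMem_grid] at hx
  omega

-- some pile bound is negative: the loops never run, both programs return the base sets
theorem pv_main_neg (n1 n2 n3 r1 r2 r3 : Int) (h : n1 < 0 ∨ n2 < 0 ∨ n3 < 0) :
    calculate_P_positions n1 n2 n3 r1 r2 r3 = calculate_P_positions_alt n1 n2 n3 r1 r2 r3 := by
  unfold calculate_P_positions calculate_P_positions_alt
  simp only [pvFoldA, pvFoldB, pvFoldBN, pvGrid_nil h, List.foldl_nil]
  exact pvIterFix (fun s => s) _ rfl _

-- all pile bounds ≤ 0: the only possibly visited cell is the origin, already in both base sets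
theorem pv_main_deg (n1 n2 n3 r1 r2 r3 : Int) (h0 : 0 ≤ n1 ∧ 0 ≤ n2 ∧ 0 ≤ n3)
    (hm : max (max n1 n2) n3 ≤ 0) :
    calculate_P_positions n1 n2 n3 r1 r2 r3 = calculate_P_positions_alt n1 n2 n3 r1 r2 r3 := by
  obtain ⟨rfl, rfl, rfl⟩ : n1 = 0 ∧ n2 = 0 ∧ n3 = 0 := by
    simp only [max_le_iff] at hm; omega
  have hstep : pvStepB r1 r2 r3 (PySem.Set.add PySem.Set.empty ((0:Int),(0:Int),(0:Int))) 0 0 0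
      = PySem.Set.add PySem.Set.empty ((0:Int),(0:Int),(0:Int)) := by
    unfold pvStepB
    split_ifs with hc
    · exact pvAdd_mem (by decide)
    · rfl
  have hg : pvGrid 0 0 0 = [((0:Int),(0:Int),(0:Int))] := by decide
  have hr1 : PySem.List.pyRange 1 (max (max (0:Int) 0) 0 + 1) 1 = [] :=
    PySem.List.pyRange_one_eq_nil (by simp)
  unfold calculate_P_positions calculate_P_positions_alt
  simp only [pvFoldA, pvFoldB, pvFoldBN, hg, hr1, List.foldl_nil, List.foldl_cons, hstep]
  rw [if_neg (by decide)]

-- ===== VERDICT (by name: the statement is the Claim_ definition above) =====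
theorem calculate_P_positions_spec : Claim_equal_calculate_P_positions := by
  intro n1 n2 n3 r1 r2 r3 _hDom hPre
  unfold Spec_calculate_P_positions
  rcases hPre with hr | hneg | hm
  · exact pv_main n1 n2 n3 r1 r2 r3 hr
  · exact pv_main_neg n1 n2 n3 r1 r2 r3 hneg
  · by_cases hn : n1 < 0 ∨ n2 < 0 ∨ n3 < 0
    · exact pv_main_neg n1 n2 n3 r1 r2 r3 hn
    · exact pv_main_deg n1 n2 n3 r1 r2 r3 (by omega) hm
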